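-- pv_equiv track=rewrite | github.com/Adam8922/Fuzetek_Training | Assignments/Assignment_1/P9.py | digit_difference
-- ===== SOURCE A (Python) =====
-- def digit_difference(n):
--     Max, Min = 0, n % 10
--     while n > 0:
--         digit = n % 10
--         if digit > Max:
--             Max = digit
--         if digit < Min:
--             Min = digit
--         n //= 10
--     return Max - Min
-- ===== SOURCE B (Python) =====
-- def digit_difference(n):
--     digits = [int(c) for c in str(n)]
--     return max(digits) - min(digits)
-- ===== Notes on version B (the rewrite author's own statement) =====
-- stated objective: idiomatic
-- what changed: B builds the list of digits from str(n) and returns max(digits) - min(digits), instead of A's single arithmetic while-loop that fuses digit extraction with running max/min updates.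
-- outside the precondition, e.g. on digit_difference(-7): A returns -3, B raises ValueError
import Mathlib
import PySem

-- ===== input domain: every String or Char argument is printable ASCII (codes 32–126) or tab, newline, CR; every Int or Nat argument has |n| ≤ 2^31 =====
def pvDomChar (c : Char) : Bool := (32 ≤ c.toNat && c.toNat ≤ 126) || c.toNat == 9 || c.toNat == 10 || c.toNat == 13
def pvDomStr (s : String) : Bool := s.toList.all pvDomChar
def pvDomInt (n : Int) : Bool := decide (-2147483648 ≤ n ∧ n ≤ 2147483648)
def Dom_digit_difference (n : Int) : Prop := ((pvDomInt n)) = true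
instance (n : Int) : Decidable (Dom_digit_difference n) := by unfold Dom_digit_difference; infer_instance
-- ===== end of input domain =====

-- B builds the digit list from str(n) and takes max - min (idiomatic two-pass), vs A's fused arithmetic loop; return value only, no mutation.

-- ===== PORT A =====
-- while n > 0: digit = n % 10; update Max, Min; n //= 10   — then return Max - Min
def digitLoopA (n Max Min : Int) : Int :=
  if _h : 0 < n then
    let d := PySem.Int.mod n 10
    digitLoopA (PySem.Int.floordiv n 10) (if Max < d then d else Max) (if d < Min then d else Min)
  else Max - Min
termination_by n.toNat
decreasing_by
  rw [PySem.Int.floordiv_eq_ediv_of_pos (by norm_num)]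
  omega

def digit_difference (n : Int) : Int :=
  digitLoopA n 0 (PySem.Int.mod n 10)

-- ===== PORT B =====
-- digits = [int(c) for c in str(n)]; return max(digits) - min(digits)
-- int(c) and max/min of the empty list raise in Python; under Pre_ (n ≥ 0) every character of
-- str(n) is a digit and the list is nonempty, so the .getD 0 defaults are never taken.
def digit_difference_alt (n : Int) : Int :=
  let digits : List Int := (PySem.Int.toChars n).map (fun c => (PySem.Int.ofChars? [c]).getD 0)
  (PySem.List.max? digits (fun x => x)).getD 0 - (PySem.List.min? digits (fun x => x)).getD 0

-- ===== PRECONDITION & SPEC =====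
-- Pre_ excludes negative n, where A's never-entered loop returns -(n % 10) while B's int('-') raises ValueError.
def Pre_digit_difference (n : Int) : Prop := 0 ≤ n
instance (n : Int) : Decidable (Pre_digit_difference n) := by unfold Pre_digit_difference; infer_instance
def pvWitness_digit_difference : Int := (90817)

def Spec_digit_difference (n : Int) (out : Int) : Prop := out = digit_difference_alt n
instance (n : Int) (out : Int) : Decidable (Spec_digit_difference n out) := by unfold Spec_digit_difference; infer_instance

-- ===== CLAIM (what is proved, stated in full; the proofs are below) =====
def Claim_equal_digit_difference : Prop := ∀ (n : Int), Dom_digit_difference n → Pre_digit_difference n → Spec_digit_difference n (digit_difference n)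

-- ===== LEMMAS AND PROOFS =====

-- the digit value a single character yields in B
def pvVal (c : Char) : Int := (PySem.Int.ofChars? [c]).getD 0

lemma pvVal_digitChar {d : Nat} (h : d < 10) : pvVal (Nat.digitChar d) = (d : Int) := by
  interval_cases d <;> decide

-- str(m) for a natural m, as a list of chars: '0' for 0, else the base-10 digits most-significant first
def pvRep (m : Nat) : List Char :=
  if m = 0 then ['0'] else ((Nat.digits 10 m).map Nat.digitChar).reverse

lemma pvRep_step {m : Nat} (hp : 0 < m) (h0 : m / 10 ≠ 0) :
    pvRep m = pvRep (m / 10) ++ [Nat.digitChar (m % 10)] := by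
  rw [pvRep, if_neg (by omega), Nat.digits_def' (b := 10) (by norm_num) hp]
  rw [pvRep, if_neg h0]
  simp

lemma toDigitsCore_eq_pvRep : ∀ (fuel m : Nat) (ds : List Char), m < fuel →
    Nat.toDigitsCore 10 fuel m ds = pvRep m ++ ds := by
  intro fuel
  induction fuel with
  | zero => intro m ds h; omega
  | succ f ih =>
    intro m ds h
    by_cases h0 : m / 10 = 0
    · have hm : m < 10 := by omega
      rw [Nat.toDigitsCore]
      simp only [h0, if_true]
      rcases Nat.eq_zero_or_pos m with hz | hp
      · subst hz; simp [pvRep, show Nat.digitChar 0 = '0' from rfl]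
      · rw [pvRep, if_neg (by omega), Nat.digits_def' (b := 10) (by norm_num) hp, h0]
        simp
    · have hp : 0 < m := by omega
      rw [Nat.toDigitsCore]
      simp only [h0, if_false]
      rw [ih (m / 10) (Nat.digitChar (m % 10) :: ds) (by omega)]
      rw [pvRep_step hp h0]
      simp

lemma toChars_nonneg (m : Nat) : PySem.Int.toChars (m : Int) = pvRep m := by
  rw [PySem.Int.toChars, if_neg (by omega)]
  simp only [Int.toNat_natCast]
  rw [Nat.toDigits, toDigitsCore_eq_pvRep (m + 1) m [] (by omega)]
  simp

-- the Int digit list (little-endian, as A's loop consumes it)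
def pvDigits (m : Nat) : List Int := (Nat.digits 10 m).map Nat.cast

lemma pvDigits_step {m : Nat} (hp : 0 < m) :
    pvDigits m = ((m % 10 : Nat) : Int) :: pvDigits (m / 10) := by
  rw [pvDigits, Nat.digits_def' (b := 10) (by norm_num) hp, List.map_cons]
  rfl

lemma map_pvVal_pvRep {m : Nat} (hp : 0 < m) :
    (pvRep m).map pvVal = (pvDigits m).reverse := by
  rw [pvRep, if_neg (by omega), pvDigits, ← List.map_reverse, ← List.map_reverse, List.map_map]
  apply List.map_congr_left
  intro d hd
  simp only [Function.comp_apply]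
  exact pvVal_digitChar (Nat.digits_lt_base (by norm_num) (List.mem_reverse.mp hd))

-- A's loop computes running max/min folds over the little-endian digit list
lemma digitLoopA_eq_folds : ∀ (m : Nat) (Max Min : Int),
    digitLoopA (m : Int) Max Min = ((pvDigits m).foldl max Max) - ((pvDigits m).foldl min Min) := by
  intro m
  induction m using Nat.strong_induction_on with
  | _ m ih =>
    intro Max Min
    rcases Nat.eq_zero_or_pos m with hz | hp
    · subst hz
      rw [digitLoopA, dif_neg (by omega)]
      simp [pvDigits]
    · rw [digitLoopA, dif_pos (by exact_mod_cast hp)]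
      have hmod : PySem.Int.mod (m : Int) 10 = ((m % 10 : Nat) : Int) := by
        simpa using PySem.Int.mod_natCast m 10
      have hdiv : PySem.Int.floordiv (m : Int) 10 = ((m / 10 : Nat) : Int) := by
        simpa using PySem.Int.floordiv_natCast m 10
      simp only [hmod, hdiv]
      rw [ih (m / 10) (Nat.div_lt_self hp (by norm_num))]
      rw [pvDigits_step hp]
      simp only [List.foldl_cons]
      congr 1
      · congr 1
        by_cases h : ((m % 10 : Nat) : Int) ≤ Max
        · rw [if_neg (by omega), max_eq_left h]
        · rw [if_pos (by omega), max_eq_right (by omega)]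
      · congr 1
        by_cases h : Min ≤ ((m % 10 : Nat) : Int)
        · rw [if_neg (by omega), min_eq_left h]
        · rw [if_pos (by omega), min_eq_right (by omega)]

-- folding min/max from a start that also occurs in the list may drop the duplicate
lemma foldl_min_absorb : ∀ (l : List Int) (x c : Int), x ∈ l →
    l.foldl min (min x c) = l.foldl min c := by
  intro l
  induction l with
  | nil => intro x c h; simp at h
  | cons y t ih =>
    intro x c h
    rcases List.mem_cons.mp h with rfl | hx
    · simp only [List.foldl_cons]
      have hs : min (min x c) x = min c x := by omega
      rw [hs, min_comm c x]
    · simp only [List.foldl_cons]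
      have hs : min (min x c) y = min x (min c y) := by omega
      rw [hs, ih x (min c y) hx]

lemma foldl_max_absorb : ∀ (l : List Int) (x c : Int), x ∈ l →
    l.foldl max (max x c) = l.foldl max c := by
  intro l
  induction l with
  | nil => intro x c h; simp at h
  | cons y t ih =>
    intro x c h
    rcases List.mem_cons.mp h with rfl | hx
    · simp only [List.foldl_cons]
      have hs : max (max x c) x = max c x := by omega
      rw [hs, max_comm c x]
    · simp only [List.foldl_cons]
      have hs : max (max x c) y = max x (max c y) := by omega
      rw [hs, ih x (max c y) hx]

-- folding min/max from the head of a nonempty list is permutation-invariant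
lemma foldl_min_head_perm {a b : Int} {l m : List Int} (p : (a :: l).Perm (b :: m)) :
    l.foldl min a = m.foldl min b := by
  have h1 : l.foldl min a = (a :: l).foldl min a := by simp
  have h2 : m.foldl min b = (b :: m).foldl min b := by simp
  rw [h1, h2, p.foldl_eq]
  have ha : a ∈ b :: m := p.subset (by simp)
  simp only [List.foldl_cons]
  rcases List.mem_cons.mp ha with rfl | hx
  · rfl
  · rw [min_self]
    exact foldl_min_absorb m a b hx

lemma foldl_max_head_perm {a b : Int} {l m : List Int} (p : (a :: l).Perm (b :: m)) :
    l.foldl max a = m.foldl max b := by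
  have h1 : l.foldl max a = (a :: l).foldl max a := by simp
  have h2 : m.foldl max b = (b :: m).foldl max b := by simp
  rw [h1, h2, p.foldl_eq]
  have ha : a ∈ b :: m := p.subset (by simp)
  simp only [List.foldl_cons]
  rcases List.mem_cons.mp ha with rfl | hx
  · rfl
  · rw [max_self]
    exact foldl_max_absorb m a b hx

-- ===== VERDICT (by name: the statement is the Claim_ definition above) =====
theorem digit_difference_spec : Claim_equal_digit_difference := by
  intro n _ hpre
  unfold Spec_digit_difference
  obtain ⟨m, rfl⟩ : ∃ m : Nat, n = (m : Int) := ⟨n.toNat, (Int.toNat_of_nonneg hpre).symm⟩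
  unfold digit_difference digit_difference_alt
  rw [digitLoopA_eq_folds]
  rw [toChars_nonneg]
  show _ = (PySem.List.max? ((pvRep m).map pvVal) _).getD 0 - (PySem.List.min? ((pvRep m).map pvVal) _).getD 0
  rcases Nat.eq_zero_or_pos m with hz | hp
  · subst hz
    simp [pvDigits, pvRep, pvVal, PySem.List.max?, PySem.List.min?, PySem.Int.mod]
  · rw [map_pvVal_pvRep hp]
    have hmod : PySem.Int.mod (m : Int) 10 = ((m % 10 : Nat) : Int) := by
      simpa using PySem.Int.mod_natCast m 10
    have hdig := pvDigits_step hp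
    obtain ⟨x, t, hrev⟩ : ∃ x t, (pvDigits m).reverse = x :: t := by
      rcases hxt : (pvDigits m).reverse with _ | ⟨x, t⟩
      · exfalso
        have := congrArg List.length hxt
        rw [hdig] at this; simp at this
      · exact ⟨x, t, rfl⟩
    rw [hrev, PySem.List.max?_id_cons, PySem.List.min?_id_cons]
    simp only [Option.getD_some]
    have hperm : (((m % 10 : Nat) : Int) :: pvDigits (m / 10)).Perm (x :: t) := by
      rw [← hdig, ← hrev]
      exact (List.reverse_perm _).symm
    have hd0 : (0 : Int) ≤ ((m % 10 : Nat) : Int) := Int.natCast_nonneg _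
    rw [hdig, hmod]
    simp only [List.foldl_cons]
    rw [max_eq_right hd0, min_self]
    rw [foldl_max_head_perm hperm, foldl_min_head_perm hperm]
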